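-- pv_equiv track=rewrite | github.com/Prograto/College-Timetable-Generator | test/main.py | peroids_adjust
-- ===== SOURCE A (Python) =====
-- def peroids_adjust(theory_subs_data,vacent_periods):
--     def change_peroids_no(impno):
--         for j in theory_subs_data.keys():
--             if theory_subs_data[j][1]==impno:
--                 theory_subs_data[j][0]+=1
--     for i in range(1,vacent_periods+1):
--         change_peroids_no(i)
--     return theory_subs_data
-- ===== SOURCE B (Python) =====
-- def peroids_adjust(theory_subs_data, vacent_periods):
--     # Single pass: an entry is incremented exactly once iff its priority lies in 1..vacent_periods.
--     if vacent_periods < 1: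
--         return theory_subs_data
--     for v in theory_subs_data.values():
--         if 1 <= v[1] <= vacent_periods:
--             v[0] += 1
--     return theory_subs_data
-- ===== Notes on version B (the rewrite author's own statement) =====
-- stated objective: faster
-- what changed: Replaces A's outer loop over every period 1..vacent_periods (each rescanning all dict entries) by one pass over the entries that tests 1 <= v[1] <= vacent_periods directly.
import Mathlib
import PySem

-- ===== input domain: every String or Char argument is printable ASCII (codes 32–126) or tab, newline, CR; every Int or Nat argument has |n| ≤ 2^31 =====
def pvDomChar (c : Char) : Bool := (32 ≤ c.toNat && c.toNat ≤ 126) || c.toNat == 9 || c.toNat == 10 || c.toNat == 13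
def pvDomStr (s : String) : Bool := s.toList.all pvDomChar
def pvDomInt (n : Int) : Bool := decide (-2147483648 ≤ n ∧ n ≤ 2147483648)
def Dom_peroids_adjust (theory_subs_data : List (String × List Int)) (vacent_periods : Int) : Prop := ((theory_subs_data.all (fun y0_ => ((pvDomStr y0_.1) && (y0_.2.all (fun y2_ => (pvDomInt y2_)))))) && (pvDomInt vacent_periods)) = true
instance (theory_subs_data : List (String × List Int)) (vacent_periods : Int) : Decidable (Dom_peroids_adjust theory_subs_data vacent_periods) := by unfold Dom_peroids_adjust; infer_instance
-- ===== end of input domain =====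

-- B replaces A's outer loop over every period 1..vacent_periods (each rescanning all dict
-- entries) by one pass testing 1 <= v[1] <= vacent_periods; equivalence of the RETURN value
-- (both Pythons also mutate the dict's value lists in place, in the same way).


-- ===== PORT A =====
-- dict lookup theory_subs_data[j] : first matching key (Pre_ keeps keys distinct; KeyError unreachable here since j ranges over the keys)
def pvDictGet (d : List (String × List Int)) (j : String) : List Int :=
  match d with
  | [] => []
  | (k, v) :: rest => if k = j then v else pvDictGet rest j

-- in-place update of entry j's value (first match), i.e. theory_subs_data[j][0] += 1 seen as a dict update
def pvDictModify (d : List (String × List Int)) (j : String) (f : List Int → List Int) : List (String × List Int) :=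
  match d with
  | [] => []
  | (k, v) :: rest => if k = j then (k, f v) :: rest else (k, v) :: pvDictModify rest j f

-- v[0] += 1  (Pre_ guarantees 2 ≤ v.length, so the pyGetD default is never used)
def pvInc0 (v : List Int) : List Int := v.set 0 (PySem.List.pyGetD v 0 0 + 1)

-- change_peroids_no(impno): for j in keys: if d[j][1]==impno: d[j][0]+=1
def pvChange (d : List (String × List Int)) (impno : Int) : List (String × List Int) :=
  (d.map Prod.fst).foldl
    (fun acc j =>
      if PySem.List.pyGetD (pvDictGet acc j) 1 0 = impno then pvDictModify acc j pvInc0 else acc)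
    d

def peroids_adjust (theory_subs_data : List (String × List Int)) (vacent_periods : Int) : List (String × List Int) :=
  (PySem.List.pyRange 1 (vacent_periods + 1) 1).foldl pvChange theory_subs_data

-- ===== PORT B =====
def peroids_adjust_alt (theory_subs_data : List (String × List Int)) (vacent_periods : Int) : List (String × List Int) :=
  if vacent_periods < 1 then theory_subs_data
  else
    theory_subs_data.map (fun p =>
      if 1 ≤ PySem.List.pyGetD p.2 1 0 ∧ PySem.List.pyGetD p.2 1 0 ≤ vacent_periods then
        (p.1, p.2.set 0 (PySem.List.pyGetD p.2 0 0 + 1))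
      else p)

-- ===== PRECONDITION & SPEC =====
-- Pre_ excludes association lists with duplicate keys (they do not denote a Python dict, A's
-- input type — the dict constructor collapses them) and, when vacent_periods ≥ 1, entries whose
-- value list has fewer than 2 elements, on which A raises IndexError at theory_subs_data[j][1].
def Pre_peroids_adjust (theory_subs_data : List (String × List Int)) (vacent_periods : Int) : Prop :=
  (theory_subs_data.map Prod.fst).Nodup ∧
  (1 ≤ vacent_periods → ∀ p ∈ theory_subs_data, 2 ≤ p.2.length)
instance (theory_subs_data : List (String × List Int)) (vacent_periods : Int) : Decidable (Pre_peroids_adjust theory_subs_data vacent_periods) := by unfold Pre_peroids_adjust; infer_instance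
def pvWitness_peroids_adjust : (List (String × List Int)) × Int := ([("a", [0, 1]), ("b", [3, 2])], 1)

def Spec_peroids_adjust (theory_subs_data : List (String × List Int)) (vacent_periods : Int) (out : List (String × List Int)) : Prop := out = peroids_adjust_alt theory_subs_data vacent_periods
instance (theory_subs_data : List (String × List Int)) (vacent_periods : Int) (out : List (String × List Int)) : Decidable (Spec_peroids_adjust theory_subs_data vacent_periods out) := by unfold Spec_peroids_adjust; infer_instance

-- ===== CLAIM (what is proved, stated in full; the proofs are below) =====
def Claim_equal_peroids_adjust : Prop := ∀ (theory_subs_data : List (String × List Int)) (vacent_periods : Int), Dom_peroids_adjust theory_subs_data vacent_periods → Pre_peroids_adjust theory_subs_data vacent_periods → Spec_peroids_adjust theory_subs_data vacent_periods (peroids_adjust theory_subs_data vacent_periods)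

-- ===== LEMMAS AND PROOFS =====

-- the per-entry effect of change_peroids_no(i)
def pvF (i : Int) (p : String × List Int) : String × List Int :=
  if PySem.List.pyGetD p.2 1 0 = i then (p.1, pvInc0 p.2) else p

theorem pvF_fst (i : Int) (p : String × List Int) : (pvF i p).1 = p.1 := by
  unfold pvF; split <;> rfl

theorem pvGetD1_inc0 (v : List Int) :
    PySem.List.pyGetD (pvInc0 v) 1 0 = PySem.List.pyGetD v 1 0 := by
  cases v with
  | nil => rfl
  | cons x t =>
    cases t with
    | nil => simp [pvInc0, PySem.List.pyGetD, PySem.List.pyGet?, PySem.List.pyIdx?]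
    | cons y t' => simp [pvInc0, PySem.List.pyGetD, PySem.List.pyGet?, PySem.List.pyIdx?]

theorem pvDictGet_head (k : String) (v : List Int) (rest : List (String × List Int)) :
    pvDictGet ((k, v) :: rest) k = v := by
  simp [pvDictGet]

theorem pvMap_id_of_not_mem (d : List (String × List Int)) (j : String) (i : Int)
    (h : ∀ p ∈ d, p.1 ≠ j) :
    d.map (fun p => if p.1 = j then pvF i p else p) = d := by
  induction d with
  | nil => rfl
  | cons hd tl ih =>
    have hk : hd.1 ≠ j := h hd (by simp)
    simp [hk, ih (fun p hp => h p (by simp [hp]))]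

-- one key step of the inner loop equals a keyed map
theorem pvStep_eq_map (d : List (String × List Int)) (j : String) (i : Int)
    (hnd : (d.map Prod.fst).Nodup) (hj : j ∈ d.map Prod.fst) :
    (if PySem.List.pyGetD (pvDictGet d j) 1 0 = i then pvDictModify d j pvInc0 else d)
      = d.map (fun p => if p.1 = j then pvF i p else p) := by
  induction d with
  | nil => simp at hj
  | cons hd tl ih =>
    obtain ⟨k, v⟩ := hd
    simp only [List.map_cons, List.nodup_cons, List.mem_cons, List.mem_map] at hnd hj
    by_cases hk : k = j
    · subst hk
      have hnot : ∀ p ∈ tl, p.1 ≠ k := by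
        intro p hp hpk
        exact hnd.1 ⟨p, hp, hpk⟩
      have htl := pvMap_id_of_not_mem tl k i hnot
      rw [pvDictGet_head]
      simp only [List.map_cons]
      rw [htl]
      by_cases hc : PySem.List.pyGetD v 1 0 = i
      · simp [pvDictModify, pvF, hc]
      · simp [pvF, hc]
    · have hj' : j ∈ tl.map Prod.fst := by
        rcases hj with h1 | h1
        · exact absurd h1.symm hk
        · exact List.mem_map.mpr h1
      have hrec := ih hnd.2 hj'
      simp only [pvDictGet, pvDictModify, if_neg hk, List.map_cons]
      split_ifs at hrec ⊢ with hc
      · simp [← hrec]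
      · simp [← hrec]

-- folding the inner loop over a nodup list of keys present in d
theorem pvFold_keys (ks : List String) (i : Int) :
    ∀ d : List (String × List Int), (d.map Prod.fst).Nodup → ks.Nodup →
      (∀ j ∈ ks, j ∈ d.map Prod.fst) →
      ks.foldl
        (fun acc j =>
          if PySem.List.pyGetD (pvDictGet acc j) 1 0 = i then pvDictModify acc j pvInc0 else acc) d
        = d.map (fun p => if p.1 ∈ ks then pvF i p else p) := by
  induction ks with
  | nil => intro d _ _ _; simp
  | cons j ks ih =>
    intro d hnd hks hsub
    simp only [List.foldl_cons]
    rw [pvStep_eq_map d j i hnd (hsub j (by simp))]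
    have hfst : (d.map (fun p => if p.1 = j then pvF i p else p)).map Prod.fst = d.map Prod.fst := by
      rw [List.map_map]; apply List.map_congr_left
      intro p _; by_cases h : p.1 = j <;> simp [h, pvF_fst]
    have hnd' : ((d.map (fun p => if p.1 = j then pvF i p else p)).map Prod.fst).Nodup := by
      rw [hfst]; exact hnd
    have hsub' : ∀ x ∈ ks, x ∈ (d.map (fun p => if p.1 = j then pvF i p else p)).map Prod.fst := by
      intro x hx; rw [hfst]; exact hsub x (by simp [hx])
    rw [ih _ hnd' (List.nodup_cons.mp hks).2 hsub']
    rw [List.map_map]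
    apply List.map_congr_left
    intro p _
    have hjks : j ∉ ks := (List.nodup_cons.mp hks).1
    by_cases hpj : p.1 = j
    · have : (pvF i p).1 ∉ ks := by rw [pvF_fst, hpj]; exact hjks
      simp [hpj, Function.comp, this]
    · by_cases hpk : p.1 ∈ ks <;> simp [hpj, hpk, Function.comp]

theorem pvChange_eq_map (d : List (String × List Int)) (i : Int)
    (hnd : (d.map Prod.fst).Nodup) : pvChange d i = d.map (pvF i) := by
  unfold pvChange
  rw [pvFold_keys (d.map Prod.fst) i d hnd hnd (fun j hj => hj)]
  apply List.map_congr_left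
  intro p hp
  have : p.1 ∈ d.map Prod.fst := List.mem_map.mpr ⟨p, hp, rfl⟩
  simp [this]

-- the outer loop over the periods, as a single map
theorem pvFold_change (l : List Int) :
    ∀ d : List (String × List Int), (d.map Prod.fst).Nodup →
      l.foldl pvChange d = d.map (fun p => l.foldl (fun q i => pvF i q) p) := by
  induction l with
  | nil => intro d _; simp
  | cons i l ih =>
    intro d hnd
    simp only [List.foldl_cons]
    rw [show pvChange d i = d.map (pvF i) from pvChange_eq_map d i hnd] at *
    have hnd' : ((d.map (pvF i)).map Prod.fst).Nodup := by
      rw [List.map_map]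
      have : (d.map (Prod.fst ∘ pvF i)) = d.map Prod.fst := by
        apply List.map_congr_left; intro p _; simp [Function.comp, pvF_fst]
      rw [this]; exact hnd
    rw [ih _ hnd', List.map_map]
    simp [Function.comp]

-- the whole period range hits one entry exactly once
theorem pvFoldRange_single (p : String × List Int) (a b : Int) :
    (PySem.List.pyRange a b 1).foldl (fun q i => pvF i q) p
      = if a ≤ PySem.List.pyGetD p.2 1 0 ∧ PySem.List.pyGetD p.2 1 0 < b
        then (p.1, pvInc0 p.2) else p := by
  by_cases hab : b ≤ a
  · rw [PySem.List.pyRange_one_eq_nil hab]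
    simp only [List.foldl_nil]
    rw [if_neg (by omega)]
  · rw [not_le] at hab
    have hn : ∃ n : Nat, (b - a).toNat = n := ⟨(b - a).toNat, rfl⟩
    obtain ⟨n, hn⟩ := hn
    induction n generalizing a p with
    | zero => omega
    | succ n ihn =>
      rw [PySem.List.pyRange_one_cons hab]
      simp only [List.foldl_cons]
      by_cases hx : PySem.List.pyGetD p.2 1 0 = a
      · have h1 : pvF a p = (p.1, pvInc0 p.2) := by simp [pvF, hx]
        rw [h1]
        by_cases hb : a + 1 < b
        · rw [ihn (p.1, pvInc0 p.2) (a + 1) hb (by omega)]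
          rw [if_neg (by simp only [pvGetD1_inc0]; omega)]
          rw [if_pos (by omega)]
        · rw [PySem.List.pyRange_one_eq_nil (by omega)]
          simp only [List.foldl_nil]
          rw [if_pos (by omega)]
      · have h1 : pvF a p = p := by simp [pvF, hx]
        rw [h1]
        by_cases hb : a + 1 < b
        · rw [ihn p (a + 1) hb (by omega)]
          by_cases hcond : a + 1 ≤ PySem.List.pyGetD p.2 1 0 ∧ PySem.List.pyGetD p.2 1 0 < b
          · rw [if_pos hcond, if_pos (by omega)]
          · rw [if_neg hcond, if_neg (by omega)]
        · rw [PySem.List.pyRange_one_eq_nil (by omega)]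
          simp only [List.foldl_nil]
          rw [if_neg (by omega)]

-- ===== VERDICT (by name: the statement is the Claim_ definition above) =====
theorem peroids_adjust_spec : Claim_equal_peroids_adjust := by
  unfold Claim_equal_peroids_adjust
  intro d v _ hpre
  unfold Spec_peroids_adjust peroids_adjust peroids_adjust_alt
  rw [pvFold_change _ d hpre.1]
  by_cases hv : v < 1
  · rw [if_pos hv]
    have : ∀ p ∈ d, (PySem.List.pyRange 1 (v + 1) 1).foldl (fun q i => pvF i q) p = p := by
      intro p _
      rw [pvFoldRange_single p 1 (v + 1), if_neg (by omega)]
    calc d.map _ = d.map id := List.map_congr_left (by simpa using this)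
      _ = d := List.map_id d
  · rw [if_neg hv]
    apply List.map_congr_left
    intro p _
    rw [pvFoldRange_single p 1 (v + 1)]
    by_cases hc : 1 ≤ PySem.List.pyGetD p.2 1 0 ∧ PySem.List.pyGetD p.2 1 0 ≤ v
    · rw [if_pos (by omega), if_pos hc]
      simp [pvInc0]
    · rw [if_neg (by omega), if_neg hc]
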